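-- pv_equiv track=rewrite | github.com/Intelligent-CAT-Lab/CS527JBR-Team-0 | graphectory/lang_construction/buildPhases.py | build_phase_sequence_rle
-- ===== SOURCE A (Python) =====
-- from typing import List, Tuple, Optional
--
-- PHASE_ABBR = {
--     'localization': 'L',
--     'patch': 'P',
--     'validation': 'V',
-- }
--
-- def build_phase_sequence_rle(step_nodes: List[Tuple[int, dict]]) -> Tuple[List[str], List[int]]:
--     """
--     Build run-length encoded phase sequence from extracted node sequence.
--
--     Args:
--         step_nodes: List of (step_index, node) tuples from extract_node_sequence
--
--     Returns:
--         phases: run-collapsed phases (L/P/V) e.g. ['L','P','V',...]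
--         lens:   streak length per run              [  3,  2,  3, ...]
--     """
--     phases: List[str] = []
--     lens: List[int] = []
--     prev: Optional[str] = None
--
--     for _, node in step_nodes:
--         phase = node.get('phase')
--
--         # Skip general phase or empty
--         if not phase or phase == 'general':
--             continue
--
--         # Get abbreviation
--         abbr = PHASE_ABBR.get(str(phase).lower())
--         if not abbr:
--             continue
--
--         # Run-length encoding
--         if abbr == prev:
--             lens[-1] += 1
--         else:
--             phases.append(abbr)
--             lens.append(1)
--             prev = abbr
--
--     return phases, lens
-- ===== SOURCE B (Python) =====
-- from itertools import groupby
-- from typing import List, Tuple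
--
-- PHASE_ABBR = {
--     'localization': 'L',
--     'patch': 'P',
--     'validation': 'V',
-- }
--
-- def build_phase_sequence_rle(step_nodes):
--     # pass 1: map/filter to the sequence of abbreviations
--     abbrs = []
--     for _, node in step_nodes:
--         phase = node.get('phase')
--         if not phase or phase == 'general':
--             continue
--         a = PHASE_ABBR.get(str(phase).lower())
--         if a is not None:
--             abbrs.append(a)
--     # pass 2: run-length encode with groupby
--     phases, lens = [], []
--     for k, g in groupby(abbrs):
--         phases.append(k)
--         lens.append(sum(1 for _ in g))
--     return phases, lens
-- ===== Notes on version B (the rewrite author's own statement) =====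
-- stated objective: idiomatic
-- what changed: Replaces A's single fused loop with prev-tracking and in-place lens[-1] increments by a map/filter pass producing the abbreviation sequence followed by an itertools.groupby run-length encoding.
import Mathlib
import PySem

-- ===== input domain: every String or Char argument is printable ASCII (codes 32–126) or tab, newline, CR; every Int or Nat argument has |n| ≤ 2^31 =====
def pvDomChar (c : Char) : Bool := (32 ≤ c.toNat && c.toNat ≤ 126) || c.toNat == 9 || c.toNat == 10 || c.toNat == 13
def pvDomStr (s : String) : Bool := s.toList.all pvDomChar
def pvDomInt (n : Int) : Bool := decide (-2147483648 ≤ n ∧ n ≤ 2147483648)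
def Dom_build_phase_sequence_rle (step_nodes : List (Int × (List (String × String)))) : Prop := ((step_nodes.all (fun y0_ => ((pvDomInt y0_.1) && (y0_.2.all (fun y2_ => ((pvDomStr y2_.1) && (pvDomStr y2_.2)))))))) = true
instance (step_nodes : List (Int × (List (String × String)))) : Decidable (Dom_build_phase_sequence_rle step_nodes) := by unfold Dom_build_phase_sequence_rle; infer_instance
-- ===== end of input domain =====

-- B replaces A's fused loop with prev-tracking by a map/filter pass to the abbreviation
-- sequence followed by an itertools.groupby run-length encoding (objective: idiomatic).

-- ===== PORT A =====
-- PHASE_ABBR as an association list (Python dict, lookup = first match)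
def PHASE_ABBR : List (String × String) :=
  [("localization", "L"), ("patch", "P"), ("validation", "V")]

-- one iteration of A's loop; state = (phases, lens, prev)
def stepA (st : List String × List Int × Option String) (node : List (String × String)) :
    List String × List Int × Option String :=
  match node.lookup "phase" with
  | none => st                                  -- 'not phase' (None)
  | some phase =>
    if phase = "" ∨ phase = "general" then st   -- 'not phase' (empty) or general
    else
      match PHASE_ABBR.lookup (PySem.Str.lower phase) with
      | none => st                              -- unknown abbreviation
      | some abbr =>
        if some abbr = st.2.2 then
          (st.1, PySem.List.pySetD st.2.1 (-1) (PySem.List.pyGetD st.2.1 (-1) 0 + 1), st.2.2)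
        else
          (st.1 ++ [abbr], st.2.1 ++ [1], some abbr)

def build_phase_sequence_rle (step_nodes : List (Int × (List (String × String)))) : List String × List Int :=
  ((step_nodes.foldl (fun st p => stepA st p.2) ([], [], none)).1,
   (step_nodes.foldl (fun st p => stepA st p.2) ([], [], none)).2.1)

-- ===== PORT B =====
-- the abbreviation of one node, none when B's loop skips it
def abbrOf (node : List (String × String)) : Option String :=
  match node.lookup "phase" with
  | none => none
  | some phase =>
    if phase = "" ∨ phase = "general" then none
    else PHASE_ABBR.lookup (PySem.Str.lower phase)

-- itertools.groupby pass: one group per run of equal consecutive elements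
def rleB : List String → List String × List Int
  | [] => ([], [])
  | x :: xs =>
    let rest := xs.dropWhile (· = x)
    let r := rleB rest
    (x :: r.1, ((xs.takeWhile (· = x)).length + 1 : Int) :: r.2)
  termination_by ys => ys.length
  decreasing_by
    simpa [Nat.lt_succ_iff] using List.length_dropWhile_le (p := fun y => decide (y = x)) (l := xs)

def build_phase_sequence_rle_alt (step_nodes : List (Int × (List (String × String)))) : List String × List Int :=
  rleB (step_nodes.filterMap (fun p => abbrOf p.2))

-- ===== PRECONDITION & SPEC =====
def Spec_build_phase_sequence_rle (step_nodes : List (Int × (List (String × String)))) (out : List String × List Int) : Prop := out = build_phase_sequence_rle_alt step_nodes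
instance (step_nodes : List (Int × (List (String × String)))) (out : List String × List Int) : Decidable (Spec_build_phase_sequence_rle step_nodes out) := by unfold Spec_build_phase_sequence_rle; infer_instance

-- ===== CLAIM (what is proved, stated in full; the proofs are below) =====
def Claim_equal_build_phase_sequence_rle : Prop := ∀ (step_nodes : List (Int × (List (String × String)))), Dom_build_phase_sequence_rle step_nodes → Spec_build_phase_sequence_rle step_nodes (build_phase_sequence_rle step_nodes)

-- ===== LEMMAS AND PROOFS =====

-- A's step is: skip when abbrOf is none, else the RLE update rstep
def rstep (st : List String × List Int × Option String) (abbr : String) :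
    List String × List Int × Option String :=
  if some abbr = st.2.2 then
    (st.1, PySem.List.pySetD st.2.1 (-1) (PySem.List.pyGetD st.2.1 (-1) 0 + 1), st.2.2)
  else
    (st.1 ++ [abbr], st.2.1 ++ [1], some abbr)

theorem stepA_eq_abbrOf (st : List String × List Int × Option String)
    (node : List (String × String)) :
    stepA st node = (abbrOf node).elim st (rstep st) := by
  unfold stepA abbrOf rstep
  cases node.lookup "phase" with
  | none => rfl
  | some phase =>
    by_cases h : phase = "" ∨ phase = "general"
    · simp [h]
    · simp only [h, if_false]
      cases PHASE_ABBR.lookup (PySem.Str.lower phase) <;> rfl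

theorem foldl_stepA_eq (xs : List (Int × (List (String × String))))
    (st : List String × List Int × Option String) :
    xs.foldl (fun st p => stepA st p.2) st
      = (xs.filterMap (fun p => abbrOf p.2)).foldl rstep st := by
  induction xs generalizing st with
  | nil => rfl
  | cons x xs ih =>
    simp only [List.foldl_cons, List.filterMap_cons]
    rw [stepA_eq_abbrOf st x.2]
    cases h : abbrOf x.2 with
    | none => exact ih st
    | some a => exact ih (rstep st a)

theorem pySetD_neg_one_append (ls : List Int) (n v : Int) :
    PySem.List.pySetD (ls ++ [n]) (-1) v = ls ++ [v] := by
  simp [PySem.List.pySetD, PySem.List.pySet?, PySem.List.pyIdx?, List.set_append]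

-- run-length encoding with a pending run (p, n)
def rleFrom (p : String) (n : Int) : List String → List String × List Int
  | [] => ([p], [n])
  | y :: ys =>
    if y = p then rleFrom p (n + 1) ys
    else
      let r := rleFrom y 1 ys
      (p :: r.1, n :: r.2)

theorem foldl_rstep_from (ys : List String) :
    ∀ (p : String) (n : Int) (ps : List String) (ls : List Int),
    ys.foldl rstep (ps ++ [p], ls ++ [n], some p)
      = (ps ++ (rleFrom p n ys).1, ls ++ (rleFrom p n ys).2, some ((p :: ys).getLast (by simp))) := by
  induction ys with
  | nil => intro p n ps ls; simp [rleFrom]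
  | cons y ys ih =>
    intro p n ps ls
    by_cases h : y = p
    · subst h
      rw [List.foldl_cons,
        show rstep (ps ++ [y], ls ++ [n], some y) y = (ps ++ [y], ls ++ [n + 1], some y) from by
          simp [rstep, PySem.List.pyGetD_neg_one_append_singleton, pySetD_neg_one_append]]
      rw [ih y (n + 1) ps ls]
      have hl : (y :: y :: ys).getLast (by simp) = (y :: ys).getLast (by simp) := by
        rw [List.getLast_cons]
      rw [hl]
      simp [rleFrom]
    · rw [List.foldl_cons,
        show rstep (ps ++ [p], ls ++ [n], some p) y = ((ps ++ [p]) ++ [y], (ls ++ [n]) ++ [1], some y) from by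
          rw [rstep, if_neg (by simpa using h)]]
      rw [ih y 1 (ps ++ [p]) (ls ++ [n])]
      have hl : (p :: y :: ys).getLast (by simp) = (y :: ys).getLast (by simp) := by
        rw [List.getLast_cons]
      rw [hl]
      simp [rleFrom, h]

theorem rleB_cons (y : String) (ys : List String) :
    rleB (y :: ys)
      = (y :: (rleB (ys.dropWhile (· = y))).1,
         ((ys.takeWhile (· = y)).length + 1 : Int) :: (rleB (ys.dropWhile (· = y))).2) := by
  rw [rleB.eq_def]

theorem rleFrom_eq_rleB (ys : List String) :
    ∀ (p : String) (n : Int),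
    rleFrom p n ys
      = (p :: (rleB (ys.dropWhile (· = p))).1,
         (n + (ys.takeWhile (· = p)).length) :: (rleB (ys.dropWhile (· = p))).2) := by
  induction ys with
  | nil => intro p n; rw [rleB.eq_def]; simp [rleFrom]
  | cons y ys ih =>
    intro p n
    by_cases h : y = p
    · subst h
      simp only [rleFrom, List.dropWhile_cons, List.takeWhile_cons, decide_true]
      rw [ih y (n + 1)]
      simp
      ring
    · simp only [rleFrom, List.dropWhile_cons, List.takeWhile_cons, decide_eq_true_eq, if_neg h]
      rw [ih y 1, rleB_cons]
      simp
      ring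

theorem foldl_rstep_eq_rleB (zs : List String) :
    ((zs.foldl rstep ([], [], none)).1, (zs.foldl rstep ([], [], none)).2.1) = rleB zs := by
  cases zs with
  | nil => rw [rleB.eq_def]; rfl
  | cons z zs =>
    rw [List.foldl_cons,
      show rstep (([] : List String), ([] : List Int), (none : Option String)) z
          = ([] ++ [z], [] ++ [(1 : Int)], some z) from by
        rw [rstep, if_neg (by simp)]]
    rw [foldl_rstep_from zs z 1 [] []]
    rw [rleFrom_eq_rleB zs z 1, rleB_cons]
    simp
    ring

-- ===== VERDICT (by name: the statement is the Claim_ definition above) =====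
theorem build_phase_sequence_rle_spec : Claim_equal_build_phase_sequence_rle := by
  intro step_nodes _
  unfold Spec_build_phase_sequence_rle build_phase_sequence_rle build_phase_sequence_rle_alt
  rw [foldl_stepA_eq]
  rw [foldl_rstep_eq_rleB]
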